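-- pv_equiv track=rewrite | github.com/dalmuri/Algorithm | 프로그래머스/3/214289. 에어컨/에어컨.py | solution
-- ===== SOURCE A (Python) =====
-- def solution(temperature, t1, t2, a, b, onboard):
--     inf = 10**6
--     target = max(temperature - t2, t1 - temperature)
--     cost = [[inf] * (target + 2) for _ in range(len(onboard))]
--     # cost[i][j] = i시각에 j온도가 되기 위한 최소 비용
--     cost[0][0] = 0
--     for i in range(1, len(onboard)):
--         start = target if onboard[i] else 0
--         end = target + 1
--
--         for j in range(start, end + 1):
--             # 에어컨 ON, 1도 상승
--             if j > 0: cost[i][j] = min(cost[i][j], cost[i - 1][j - 1] + a)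
--
--             # 온도 유지
--             if j == 0: cost[i][j] = min(cost[i][j], cost[i - 1][j]) # 외부 온도와 동일하여 에어컨 OFF
--             else: cost[i][j] = min(cost[i][j], cost[i - 1][j] + b) # 외부 온도와 달라 에어컨 ON
--
--             # 에어컨 OFF, 1도 하강
--             if j < target + 1: cost[i][j] = min(cost[i][j], cost[i - 1][j + 1])
--
--     return min(cost[len(onboard) - 1])
-- ===== SOURCE B (Python) =====
-- def solution(temperature, t1, t2, a, b, onboard):
--     # Top-down recursion on time: row(i) is the (pure) list of minimum INF-capped costs
--     # for every temperature-difference j at time i; rows are memoized and filled in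
--     # ascending order so the recursion stays shallow.
--     INF = 10 ** 6
--     target = max(temperature - t2, t1 - temperature)
--     n = len(onboard)
--     memo = {}
--
--     def row(i):
--         if i in memo:
--             return memo[i]
--         if i == 0:
--             r = [0 if j == 0 else INF for j in range(target + 2)]
--         else:
--             prev = row(i - 1)
--             lo = target if onboard[i] else 0
--             r = [INF if (j < lo or j > target + 1) else
--                  min(prev[j - 1] + a if j > 0 else INF,
--                      prev[j] + (b if j else 0),
--                      prev[j + 1] if j <= target else INF,
--                      INF)
--                  for j in range(target + 2)]
--         memo[i] = r
--         return r
--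
--     for i in range(n):
--         row(i)
--     return min(row(n - 1))
-- ===== Notes on version B (the rewrite author's own statement) =====
-- stated objective: alternative
-- what changed: Replaces A's bottom-up in-place 2D table with three sequential min-updates per cell by a top-down memoized recursion on time whose pure rows are each built in one comprehension from the previous row.
-- intended difference: When the temperature lies strictly one degree inside (t1,t2) (target = -1), b < 0 and someone boards after time 0, A's single-column table is updated through Python negative-index wraparound and returns b times the number of later boardings, while B returns the intended 0 (the temperature is already in range at no cost). — e.g. on solution(1, 0, 2, 0, -1, [0, 1]): A returns -1, B returns 0
import Mathlib
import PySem

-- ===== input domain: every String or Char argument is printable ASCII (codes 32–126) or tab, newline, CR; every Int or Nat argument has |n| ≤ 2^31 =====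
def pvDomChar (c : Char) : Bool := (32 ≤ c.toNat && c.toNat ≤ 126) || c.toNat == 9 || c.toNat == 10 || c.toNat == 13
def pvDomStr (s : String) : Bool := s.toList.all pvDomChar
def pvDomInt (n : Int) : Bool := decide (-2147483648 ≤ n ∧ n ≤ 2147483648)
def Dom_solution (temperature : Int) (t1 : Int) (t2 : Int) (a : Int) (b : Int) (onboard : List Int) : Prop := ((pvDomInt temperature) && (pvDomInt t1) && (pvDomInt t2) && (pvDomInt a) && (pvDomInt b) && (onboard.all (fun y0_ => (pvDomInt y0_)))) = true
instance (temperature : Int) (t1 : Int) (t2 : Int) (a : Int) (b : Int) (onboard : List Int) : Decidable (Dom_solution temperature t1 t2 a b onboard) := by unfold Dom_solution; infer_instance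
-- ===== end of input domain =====

-- B replaces A's bottom-up in-place table fill by a pure top-down recurrence (alternative
-- decomposition, same cost); at target = -1 A's value is shaped by negative-index wraparound
-- and B instead returns the intended 0 (see D_solution below).

-- ===== PORT A =====
-- cost[i][j] read/write, Python indexing (negative indices wrap); defaults are never hit
-- on the admitted inputs.
def pvGet2 (m : List (List Int)) (i j : Int) : Int :=
  PySem.List.pyGetD (PySem.List.pyGetD m i []) j 0

def pvSet2 (m : List (List Int)) (i j : Int) (v : Int) : List (List Int) :=
  PySem.List.pySetD m i (PySem.List.pySetD (PySem.List.pyGetD m i []) j v)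

def solution (temperature : Int) (t1 : Int) (t2 : Int) (a : Int) (b : Int) (onboard : List Int) : Int :=
  let inf : Int := 10 ^ 6
  let target : Int := max (temperature - t2) (t1 - temperature)
  let n : Nat := onboard.length
  let cost : List (List Int) := (List.range n).map (fun _ => List.replicate (target + 2).toNat inf)
  let cost := pvSet2 cost 0 0 0
  let cost := (PySem.List.pyRange 1 (n : Int) 1).foldl (fun cost i =>
    let start : Int := if PySem.List.pyGetD onboard i 0 ≠ 0 then target else 0
    let stop : Int := target + 1
    (PySem.List.pyRange start (stop + 1) 1).foldl (fun cost j =>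
      let cost := if j > 0 then pvSet2 cost i j (min (pvGet2 cost i j) (pvGet2 cost (i - 1) (j - 1) + a)) else cost
      let cost := if j = 0 then pvSet2 cost i j (min (pvGet2 cost i j) (pvGet2 cost (i - 1) j))
                  else pvSet2 cost i j (min (pvGet2 cost i j) (pvGet2 cost (i - 1) j + b))
      if j < target + 1 then pvSet2 cost i j (min (pvGet2 cost i j) (pvGet2 cost (i - 1) (j + 1))) else cost) cost) cost
  (PySem.List.min? (PySem.List.pyGetD cost ((n : Int) - 1) []) (fun x => x)).getD 0

-- ===== PORT B =====
-- row i of Source B: the pure list of INF-capped minimum costs at time i, built by one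
-- comprehension from the previous row (Source B's memo/fill order is an evaluation-order
-- device only; the computed rows are exactly these).
def pvRowB (target a b : Int) (onboard : List Int) : Nat → List Int
  | 0 => (PySem.List.pyRange 0 (target + 2) 1).map (fun j => if j = 0 then 0 else 10 ^ 6)
  | i + 1 =>
    let prev := pvRowB target a b onboard i
    let lo : Int := if PySem.List.pyGetD onboard ((i : Int) + 1) 0 ≠ 0 then target else 0
    (PySem.List.pyRange 0 (target + 2) 1).map (fun j =>
      if j < lo ∨ target + 1 < j then 10 ^ 6
      else min (min (min (if 0 < j then PySem.List.pyGetD prev (j - 1) 0 + a else 10 ^ 6)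
                         (PySem.List.pyGetD prev j 0 + (if j ≠ 0 then b else 0)))
                    (if j ≤ target then PySem.List.pyGetD prev (j + 1) 0 else 10 ^ 6))
               (10 ^ 6))

def solution_alt (temperature : Int) (t1 : Int) (t2 : Int) (a : Int) (b : Int) (onboard : List Int) : Int :=
  let target : Int := max (temperature - t2) (t1 - temperature)
  let n : Nat := onboard.length
  (PySem.List.min? (pvRowB target a b onboard (n - 1)) (fun x => x)).getD 0

-- ===== PRECONDITION & SPEC =====
-- Pre_ excludes exactly the inputs where A raises IndexError: empty onboard (cost[0][0]
-- fails) and target ≤ -2 (the rows are empty, so cost[0][0] fails).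
def Pre_solution (temperature : Int) (t1 : Int) (t2 : Int) (a : Int) (b : Int) (onboard : List Int) : Prop :=
  onboard ≠ [] ∧ -1 ≤ max (temperature - t2) (t1 - temperature)
instance (temperature : Int) (t1 : Int) (t2 : Int) (a : Int) (b : Int) (onboard : List Int) : Decidable (Pre_solution temperature t1 t2 a b onboard) := by unfold Pre_solution; infer_instance
def pvWitness_solution : Int × Int × Int × Int × Int × List Int := (5, 2, 4, 3, 2, [0, 1, 1])

-- When the temperature lies strictly one degree inside (t1, t2) (target = -1), b < 0 and
-- someone boards after time 0, A's single-column table is updated through Python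
-- negative-index wraparound and returns b times the number of later boardings, while B
-- returns the intended 0 (the temperature is already in range at no cost).
def D_solution (temperature : Int) (t1 : Int) (t2 : Int) (a : Int) (b : Int) (onboard : List Int) : Prop :=
  max (temperature - t2) (t1 - temperature) = -1 ∧ b < 0 ∧ ∃ x ∈ onboard.drop 1, x ≠ 0
instance (temperature : Int) (t1 : Int) (t2 : Int) (a : Int) (b : Int) (onboard : List Int) : Decidable (D_solution temperature t1 t2 a b onboard) := by unfold D_solution; infer_instance

def Spec_solution (temperature : Int) (t1 : Int) (t2 : Int) (a : Int) (b : Int) (onboard : List Int) (out : Int) : Prop := ¬ D_solution temperature t1 t2 a b onboard → out = solution_alt temperature t1 t2 a b onboard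
instance (temperature : Int) (t1 : Int) (t2 : Int) (a : Int) (b : Int) (onboard : List Int) (out : Int) : Decidable (Spec_solution temperature t1 t2 a b onboard out) := by unfold Spec_solution; infer_instance

def pvDiffWitness_solution : Int × Int × Int × Int × Int × List Int := (1, 0, 2, 0, -1, [0, 1])
def pvDiffWitnessOut_solution : Int × Int := (-1, 0)

-- ===== CLAIM (what is proved, stated in full; the proofs are below) =====
def Claim_unchanged_solution : Prop := ∀ (temperature : Int) (t1 : Int) (t2 : Int) (a : Int) (b : Int) (onboard : List Int), Dom_solution temperature t1 t2 a b onboard → Pre_solution temperature t1 t2 a b onboard → Spec_solution temperature t1 t2 a b onboard (solution temperature t1 t2 a b onboard)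
def Claim_changed_solution : Prop := Dom_solution (pvDiffWitness_solution.1) (pvDiffWitness_solution.2.1) (pvDiffWitness_solution.2.2.1) (pvDiffWitness_solution.2.2.2.1) (pvDiffWitness_solution.2.2.2.2.1) (pvDiffWitness_solution.2.2.2.2.2) ∧ Pre_solution (pvDiffWitness_solution.1) (pvDiffWitness_solution.2.1) (pvDiffWitness_solution.2.2.1) (pvDiffWitness_solution.2.2.2.1) (pvDiffWitness_solution.2.2.2.2.1) (pvDiffWitness_solution.2.2.2.2.2) ∧ D_solution (pvDiffWitness_solution.1) (pvDiffWitness_solution.2.1) (pvDiffWitness_solution.2.2.1) (pvDiffWitness_solution.2.2.2.1) (pvDiffWitness_solution.2.2.2.2.1) (pvDiffWitness_solution.2.2.2.2.2) ∧ solution (pvDiffWitness_solution.1) (pvDiffWitness_solution.2.1) (pvDiffWitness_solution.2.2.1) (pvDiffWitness_solution.2.2.2.1) (pvDiffWitness_solution.2.2.2.2.1) (pvDiffWitness_solution.2.2.2.2.2) = pvDiffWitnessOut_solution.1 ∧ solution_alt (pvDiffWitness_solution.1) (pvDiffWitness_solution.2.1) (pvDiffWitness_solution.2.2.1) (pvDiffWitness_solution.2.2.2.1)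 (pvDiffWitness_solution.2.2.2.2.1) (pvDiffWitness_solution.2.2.2.2.2) = pvDiffWitnessOut_solution.2 ∧ pvDiffWitnessOut_solution.1 ≠ pvDiffWitnessOut_solution.2
def Claim_exact_solution : Prop := ∀ (temperature : Int) (t1 : Int) (t2 : Int) (a : Int) (b : Int) (onboard : List Int), Dom_solution temperature t1 t2 a b onboard → Pre_solution temperature t1 t2 a b onboard → D_solution temperature t1 t2 a b onboard → solution temperature t1 t2 a b onboard ≠ solution_alt temperature t1 t2 a b onboard

-- ===== LEMMAS AND PROOFS =====
def pvAltCost (target a b : Int) (onboard : List Int) : Nat → Int → Int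
  | 0, j => if j = 0 then 0 else 10 ^ 6
  | i + 1, j =>
    let lo : Int := if PySem.List.pyGetD onboard ((i : Int) + 1) 0 ≠ 0 then target else 0
    if j < lo ∨ target + 1 < j then 10 ^ 6
    else
      let best : Int := 10 ^ 6
      let best := if 0 < j then min best (pvAltCost target a b onboard i (j - 1) + a) else best
      let best := min best (pvAltCost target a b onboard i j + (if j ≠ 0 then b else 0))
      if j ≤ target then min best (pvAltCost target a b onboard i (j + 1)) else best

theorem pvRowB_eq_map (T a b : Int) (ob : List Int) :
    ∀ i : Nat, pvRowB T a b ob i = (PySem.List.pyRange 0 (T + 2) 1).map (fun j => pvAltCost T a b ob i j)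
  | 0 => List.map_congr_left (fun j _ => by simp [pvAltCost])
  | i + 1 => by
    simp only [pvRowB]
    rw [pvRowB_eq_map T a b ob i]
    apply List.map_congr_left
    intro j hj
    rw [PySem.List.mem_pyRange_one] at hj
    have hC : pvAltCost T a b ob (i + 1) j
        = (if j < (if PySem.List.pyGetD ob ((i : Int) + 1) 0 ≠ 0 then T else 0) ∨ T + 1 < j then 10 ^ 6
           else if j ≤ T
            then min (min (if 0 < j then min (10 ^ 6) (pvAltCost T a b ob i (j - 1) + a) else 10 ^ 6)
                      (pvAltCost T a b ob i j + (if j ≠ 0 then b else 0)))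
                  (pvAltCost T a b ob i (j + 1))
            else min (if 0 < j then min (10 ^ 6) (pvAltCost T a b ob i (j - 1) + a) else 10 ^ 6)
                  (pvAltCost T a b ob i j + (if j ≠ 0 then b else 0))) := by
      simp only [pvAltCost]
    rw [hC]
    split_ifs with h1 h2 h3 h4 h5 h6 h7 h8 <;>
      (try rw [PySem.List.pyGetD_map_pyRange_of_nonneg _ (T + 2) (j - 1) 0 (by omega) (by omega)]) <;>
      (try rw [PySem.List.pyGetD_map_pyRange_of_nonneg _ (T + 2) j 0 (by omega) (by omega)]) <;>
      (try rw [PySem.List.pyGetD_map_pyRange_of_nonneg _ (T + 2) (j + 1) 0 (by omega) (by omega)]) <;>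
      omega

def pvCellA (T a b : Int) (cost : List (List Int)) (i j : Int) : List (List Int) :=
  let cost := if j > 0 then pvSet2 cost i j (min (pvGet2 cost i j) (pvGet2 cost (i - 1) (j - 1) + a)) else cost
  let cost := if j = 0 then pvSet2 cost i j (min (pvGet2 cost i j) (pvGet2 cost (i - 1) j))
              else pvSet2 cost i j (min (pvGet2 cost i j) (pvGet2 cost (i - 1) j + b))
  if j < T + 1 then pvSet2 cost i j (min (pvGet2 cost i j) (pvGet2 cost (i - 1) (j + 1))) else cost

def pvRowStep (T a b : Int) (p r : List Int) (j : Int) : List Int :=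
  let r1 := if j > 0 then PySem.List.pySetD r j (min (PySem.List.pyGetD r j 0) (PySem.List.pyGetD p (j - 1) 0 + a)) else r
  let r2 := if j = 0 then PySem.List.pySetD r1 j (min (PySem.List.pyGetD r1 j 0) (PySem.List.pyGetD p j 0))
            else PySem.List.pySetD r1 j (min (PySem.List.pyGetD r1 j 0) (PySem.List.pyGetD p j 0 + b))
  if j < T + 1 then PySem.List.pySetD r2 j (min (PySem.List.pyGetD r2 j 0) (PySem.List.pyGetD p (j + 1) 0)) else r2

theorem pv_foldl_pyRange_inv {σ : Type} (g : σ → Int → σ) (stop : Int) (Q : Int → σ → Prop)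
    (hstep : ∀ j x, Q j x → j < stop → Q (j + 1) (g x j)) :
    ∀ (s : Int) (x : σ), s ≤ stop → Q s x → Q stop ((PySem.List.pyRange s stop 1).foldl g x) := by
  intro s x hs hQ
  by_cases h : s = stop
  · subst h; rw [PySem.List.pyRange_one_eq_nil le_rfl]; exact hQ
  · have hlt : s < stop := lt_of_le_of_ne hs h
    rw [PySem.List.pyRange_one_cons hlt]
    simp only [List.foldl_cons]
    exact pv_foldl_pyRange_inv g stop Q hstep (s + 1) (g x s) (by omega) (hstep s x hQ hlt)
termination_by s _ _ _ => (stop - s).toNat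
decreasing_by omega

-- matrix read/write helpers
theorem pvGet2_nonneg (m : List (List Int)) (i j : Int) (hi : 0 ≤ i) :
    pvGet2 m i j = PySem.List.pyGetD (m.getD i.toNat []) j 0 := by
  simp [pvGet2, PySem.List.pyGetD_of_nonneg _ _ hi]

theorem pvSet2_nonneg (m : List (List Int)) (i j : Int) (v : Int) (hi : 0 ≤ i) :
    pvSet2 m i j v = m.set i.toNat (PySem.List.pySetD (m.getD i.toNat []) j v) := by
  simp [pvSet2, PySem.List.pyGetD_of_nonneg _ _ hi, PySem.List.pySetD_of_nonneg _ _ hi]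

theorem pv_getD_set_self (m : List (List Int)) (it : Nat) (r : List Int) (h : it < m.length) :
    (m.set it r).getD it [] = r := by
  simp [List.getD_eq_getElem?_getD, List.getElem?_set_self (by simpa using h)]

theorem pv_getD_set_ne (m : List (List Int)) (it k : Nat) (r : List Int) (h : it ≠ k) :
    (m.set it r).getD k [] = m.getD k [] := by
  simp [List.getD_eq_getElem?_getD, List.getElem?_set_ne h]

theorem pv_cellA_eq_set (T a b : Int) (m : List (List Int)) (i j : Int)
    (h1 : 1 ≤ i) (h2 : i < (m.length : Int)) :
    pvCellA T a b m i j
      = m.set i.toNat (pvRowStep T a b (m.getD (i.toNat - 1) []) (m.getD i.toNat []) j) := by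
  have hi : 0 ≤ i := by omega
  have hit : i.toNat < m.length := by omega
  have hne : i.toNat ≠ i.toNat - 1 := by omega
  have hi1 : (i - 1).toNat = i.toNat - 1 := by omega
  have hget1 : ∀ (ρ : List Int) (x : Int), pvGet2 (m.set i.toNat ρ) i x = PySem.List.pyGetD ρ x 0 := by
    intro ρ x
    rw [pvGet2_nonneg _ _ _ hi, pv_getD_set_self _ _ _ hit]
  have hgetp : ∀ (ρ : List Int) (x : Int), pvGet2 (m.set i.toNat ρ) (i - 1) x
      = PySem.List.pyGetD (m.getD (i.toNat - 1) []) x 0 := by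
    intro ρ x
    rw [pvGet2_nonneg _ _ _ (by omega), hi1, pv_getD_set_ne _ _ _ _ hne]
  have hset1 : ∀ (ρ : List Int) (x v : Int), pvSet2 (m.set i.toNat ρ) i x v
      = m.set i.toNat (PySem.List.pySetD ρ x v) := by
    intro ρ x v
    rw [pvSet2_nonneg _ _ _ _ hi, pv_getD_set_self _ _ _ hit, List.set_set]
  have hm : m = m.set i.toNat (m.getD i.toNat []) := by
    apply List.ext_getElem (by simp)
    intro k hk hk'
    by_cases hki : i.toNat = k
    · subst hki
      rw [List.getElem_set_self]
      simp [List.getD_eq_getElem?_getD, List.getElem?_eq_getElem (by simpa using hk)]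
    · rw [List.getElem_set_ne hki]
  simp only [pvCellA, pvRowStep]
  conv_lhs => rw [hm]
  split_ifs with hc1 hc2 hc3 <;>
    simp only [hget1, hgetp, hset1, pvGet2_nonneg _ _ _ hi, pvSet2_nonneg _ _ _ _ hi,
      pv_getD_set_self _ _ _ hit, hi1, pv_getD_set_ne _ _ _ _ hne, List.set_set]

theorem pv_foldl_cellA (T a b : Int) :
    ∀ (js : List Int) (m : List (List Int)) (ρ : List Int) (i : Int),
      1 ≤ i → i < (m.length : Int) →
    js.foldl (fun c j => pvCellA T a b c i j) (m.set i.toNat ρ)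
      = m.set i.toNat (js.foldl (pvRowStep T a b (m.getD (i.toNat - 1) [])) ρ)
  | [], m, ρ, i, _, _ => rfl
  | j :: js, m, ρ, i, h1, h2 => by
    simp only [List.foldl_cons]
    have hit : i.toNat < m.length := by omega
    rw [pv_cellA_eq_set T a b (m.set i.toNat ρ) i j h1 (by simpa using h2),
      pv_getD_set_self _ _ _ hit, pv_getD_set_ne _ _ _ _ (by omega : i.toNat ≠ i.toNat - 1),
      List.set_set]
    exact pv_foldl_cellA T a b js m _ i h1 h2
-- C (i+1) j = inf below the row's start
theorem pv_alt_lt_lo (T a b : Int) (ob : List Int) (i : Nat) (j : Int)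
    (h : j < (if PySem.List.pyGetD ob ((i : Int) + 1) 0 ≠ 0 then T else 0)) :
    pvAltCost T a b ob (i + 1) j = 10 ^ 6 := by
  simp only [pvAltCost]
  rw [if_pos (Or.inl h)]

theorem pv_rowStep_val (T a b : Int) (ob : List Int) (hT : 0 ≤ T) (i : Nat) (p r : List Int)
    (hplen : p.length = (T + 2).toNat)
    (hp : ∀ k : Nat, k < (T + 2).toNat → p.getD k 0 = pvAltCost T a b ob i (k : Int))
    (j : Int) (hj0 : 0 ≤ j) (hj : j ≤ T + 1)
    (hst : (if PySem.List.pyGetD ob ((i : Int) + 1) 0 ≠ 0 then T else 0) ≤ j)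
    (hrlen : r.length = (T + 2).toNat)
    (hrj : r.getD j.toNat 0 = 10 ^ 6) :
    pvRowStep T a b p r j = r.set j.toNat (pvAltCost T a b ob (i + 1) j) := by
  have hjt : j.toNat < r.length := by omega
  have hpj : ∀ x : Int, 0 ≤ x → x ≤ T + 1 → PySem.List.pyGetD p x 0 = pvAltCost T a b ob i x := by
    intro x hx0 hx1
    rw [PySem.List.pyGetD_of_nonneg _ _ hx0, hp x.toNat (by omega)]
    congr 1; omega
  have hrget : ∀ v : Int, PySem.List.pyGetD (r.set j.toNat v) j 0 = v := by
    intro v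
    rw [PySem.List.pyGetD_of_nonneg _ _ hj0]
    simp [List.getD_eq_getElem?_getD, List.getElem?_set_self (by simpa using hjt)]
  have hrset : ∀ v w : Int, PySem.List.pySetD (r.set j.toNat v) j w = r.set j.toNat w := by
    intro v w
    rw [PySem.List.pySetD_of_nonneg _ _ hj0, List.set_set]
  have hguard : ¬ (j < (if PySem.List.pyGetD ob ((i : Int) + 1) 0 ≠ 0 then T else 0) ∨ T + 1 < j) := by
    push_neg
    exact ⟨hst, by omega⟩
  have hC : pvAltCost T a b ob (i + 1) j
      = (if j ≤ T
          then min (min (if 0 < j then min (10 ^ 6) (pvAltCost T a b ob i (j - 1) + a) else 10 ^ 6)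
                    (pvAltCost T a b ob i j + (if j ≠ 0 then b else 0)))
                (pvAltCost T a b ob i (j + 1))
          else min (if 0 < j then min (10 ^ 6) (pvAltCost T a b ob i (j - 1) + a) else 10 ^ 6)
                (pvAltCost T a b ob i j + (if j ≠ 0 then b else 0))) := by
    simp only [pvAltCost]
    rw [if_neg hguard]
  rw [hC]
  simp only [pvRowStep]
  split_ifs with h1 h2 h3 h4 h5 h6 h7 h8 <;>
    first
      | omega
      | (simp only [PySem.List.pySetD_of_nonneg r _ hj0, PySem.List.pyGetD_of_nonneg r _ hj0, hrj,
           hrget, hrset, hpj j hj0 hj, add_zero] <;>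
         (try simp only [hpj (j - 1) (by omega) (by omega)]) <;>
         (try simp only [hpj (j + 1) (by omega) (by omega)]) <;>
         first | rfl | omega)
theorem pv_getD_set_self' {α : Type} (m : List α) (it : Nat) (r : α) (d : α) (h : it < m.length) :
    (m.set it r).getD it d = r := by
  simp [List.getD_eq_getElem?_getD, List.getElem?_set_self (by simpa using h)]

theorem pv_getD_set_ne' {α : Type} (m : List α) (it k : Nat) (r : α) (d : α) (h : it ≠ k) :
    (m.set it r).getD k d = m.getD k d := by
  simp [List.getD_eq_getElem?_getD, List.getElem?_set_ne h]

theorem pv_set_getD_self {α : Type} (m : List α) (it : Nat) (d : α) (h : it < m.length) :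
    m.set it (m.getD it d) = m := by
  apply List.ext_getElem (by simp)
  intro k hk hk'
  by_cases hki : it = k
  · subst hki
    rw [List.getElem_set_self]
    simp [List.getD_eq_getElem?_getD, List.getElem?_eq_getElem (by simpa using h)]
  · rw [List.getElem_set_ne hki]

theorem pv_rowfold_spec (T a b : Int) (ob : List Int) (hT : 0 ≤ T) (i : Nat) (p : List Int)
    (hplen : p.length = (T + 2).toNat)
    (hp : ∀ k : Nat, k < (T + 2).toNat → p.getD k 0 = pvAltCost T a b ob i (k : Int)) :
    ((PySem.List.pyRange (if PySem.List.pyGetD ob ((i : Int) + 1) 0 ≠ 0 then T else 0) (T + 1 + 1) 1).foldl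
        (pvRowStep T a b p) (List.replicate (T + 2).toNat (10 ^ 6))).length = (T + 2).toNat ∧
    ∀ k : Nat, k < (T + 2).toNat →
      ((PySem.List.pyRange (if PySem.List.pyGetD ob ((i : Int) + 1) 0 ≠ 0 then T else 0) (T + 1 + 1) 1).foldl
        (pvRowStep T a b p) (List.replicate (T + 2).toNat (10 ^ 6))).getD k 0
        = pvAltCost T a b ob (i + 1) (k : Int) := by
  have hstart0 : (0 : Int) ≤ (if PySem.List.pyGetD ob ((i : Int) + 1) 0 ≠ 0 then T else 0) := by
    split_ifs <;> omega
  have hstartle : (if PySem.List.pyGetD ob ((i : Int) + 1) 0 ≠ 0 then T else 0) ≤ T + 1 + 1 := by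
    split_ifs <;> omega
  have main := pv_foldl_pyRange_inv (pvRowStep T a b p) (T + 1 + 1)
    (fun s r => (if PySem.List.pyGetD ob ((i : Int) + 1) 0 ≠ 0 then T else 0) ≤ s ∧
      r.length = (T + 2).toNat ∧
      ∀ k : Nat, k < (T + 2).toNat → r.getD k 0 =
        if (if PySem.List.pyGetD ob ((i : Int) + 1) 0 ≠ 0 then T else 0) ≤ (k : Int) ∧ (k : Int) < s
        then pvAltCost T a b ob (i + 1) (k : Int) else 10 ^ 6)
    (by
      intro j r hQ hjlt
      obtain ⟨hsj, hrlen, hr⟩ := hQ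
      have hj0 : 0 ≤ j := le_trans hstart0 hsj
      have hrj : r.getD j.toNat 0 = 10 ^ 6 := by
        rw [hr j.toNat (by omega)]
        rw [if_neg (by omega)]
      rw [pv_rowStep_val T a b ob hT i p r hplen hp j hj0 (by omega) hsj hrlen hrj]
      refine ⟨by omega, by simpa using hrlen, ?_⟩
      intro k hk
      by_cases hkj : k = j.toNat
      · subst hkj
        rw [pv_getD_set_self' _ _ _ _ (by omega)]
        rw [if_pos (by omega)]
        congr 1
        omega
      · rw [pv_getD_set_ne' _ _ _ _ _ (by omega : j.toNat ≠ k), hr k hk]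
        by_cases hc : (if PySem.List.pyGetD ob ((i : Int) + 1) 0 ≠ 0 then T else 0) ≤ (k : Int) ∧ (k : Int) < j
        · rw [if_pos hc, if_pos (by omega)]
        · rw [if_neg hc, if_neg (by omega)])
    (if PySem.List.pyGetD ob ((i : Int) + 1) 0 ≠ 0 then T else 0)
    (List.replicate (T + 2).toNat (10 ^ 6)) hstartle
    (by
      refine ⟨le_rfl, by simp, ?_⟩
      intro k hk
      rw [if_neg (by omega)]
      simp [List.getD_eq_getElem?_getD, List.getElem?_replicate, hk])
  obtain ⟨-, hlen, hval⟩ := main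
  refine ⟨hlen, ?_⟩
  intro k hk
  rw [hval k hk]
  by_cases hc : (if PySem.List.pyGetD ob ((i : Int) + 1) 0 ≠ 0 then T else 0) ≤ (k : Int)
  · rw [if_pos ⟨hc, by omega⟩]
  · rw [if_neg (by omega)]
    rw [pv_alt_lt_lo T a b ob i (k : Int) (by omega)]

def pvOuterA (T a b : Int) (ob : List Int) (cost : List (List Int)) (i : Int) : List (List Int) :=
  let start : Int := if PySem.List.pyGetD ob i 0 ≠ 0 then T else 0
  let stop : Int := T + 1
  (PySem.List.pyRange start (stop + 1) 1).foldl (fun cost j =>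
    let cost := if j > 0 then pvSet2 cost i j (min (pvGet2 cost i j) (pvGet2 cost (i - 1) (j - 1) + a)) else cost
    let cost := if j = 0 then pvSet2 cost i j (min (pvGet2 cost i j) (pvGet2 cost (i - 1) j))
                else pvSet2 cost i j (min (pvGet2 cost i j) (pvGet2 cost (i - 1) j + b))
    if j < T + 1 then pvSet2 cost i j (min (pvGet2 cost i j) (pvGet2 cost (i - 1) (j + 1))) else cost) cost

def pvInv (T a b : Int) (ob : List Int) (it : Nat) (m : List (List Int)) : Prop :=
  m.length = ob.length ∧ (m.getD it []).length = (T + 2).toNat ∧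
  (∀ k : Nat, k < (T + 2).toNat → (m.getD it []).getD k 0 = pvAltCost T a b ob it (k : Int)) ∧
  (∀ k : Nat, it < k → k < ob.length → m.getD k [] = List.replicate (T + 2).toNat (10 ^ 6))

theorem pv_outer_step (T a b : Int) (ob : List Int) (hT : 0 ≤ T) (it : Nat) (m : List (List Int))
    (h : pvInv T a b ob it m) (hlt : it + 1 < ob.length) :
    pvInv T a b ob (it + 1) (pvOuterA T a b ob m ((it : Int) + 1)) := by
  obtain ⟨hlen, hrowlen, hrow, hrest⟩ := h
  have hcell : pvOuterA T a b ob m ((it : Int) + 1)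
      = (PySem.List.pyRange (if PySem.List.pyGetD ob ((it : Int) + 1) 0 ≠ 0 then T else 0) (T + 1 + 1) 1).foldl
          (fun c j => pvCellA T a b c ((it : Int) + 1) j) m := rfl
  have hfold := pv_foldl_cellA T a b
    (PySem.List.pyRange (if PySem.List.pyGetD ob ((it : Int) + 1) 0 ≠ 0 then T else 0) (T + 1 + 1) 1)
    m (m.getD (it + 1) []) ((it : Int) + 1) (by omega) (by omega)
  have hitn : ((it : Int) + 1).toNat = it + 1 := by omega
  rw [hitn, pv_set_getD_self m (it + 1) [] (by omega)] at hfold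
  have hprev : it + 1 - 1 = it := by omega
  rw [hprev] at hfold
  have hinit : m.getD (it + 1) [] = List.replicate (T + 2).toNat (10 ^ 6) :=
    hrest (it + 1) (by omega) hlt
  rw [hinit] at hfold
  rw [hcell, hfold]
  obtain ⟨hlen', hval'⟩ := pv_rowfold_spec T a b ob hT it (m.getD it []) hrowlen hrow
  refine ⟨by simpa using hlen, ?_, ?_, ?_⟩
  · rw [pv_getD_set_self' _ _ _ _ (by omega)]
    exact hlen'
  · intro k hk
    rw [pv_getD_set_self' _ _ _ _ (by omega)]
    exact hval' k hk
  · intro k hk1 hk2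
    rw [pv_getD_set_ne' _ _ _ _ _ (by omega : it + 1 ≠ k)]
    exact hrest k (by omega) hk2

theorem pv_outer_all (T a b : Int) (ob : List Int) (hT : 0 ≤ T) (hn : 1 ≤ ob.length)
    (m0 : List (List Int)) (h0 : pvInv T a b ob 0 m0) :
    pvInv T a b ob (ob.length - 1) ((PySem.List.pyRange 1 (ob.length : Int) 1).foldl (pvOuterA T a b ob) m0) := by
  have main := pv_foldl_pyRange_inv (pvOuterA T a b ob) (ob.length : Int)
    (fun s m => 1 ≤ s ∧ s ≤ (ob.length : Int) ∧ pvInv T a b ob (s.toNat - 1) m)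
    (by
      intro i m hQ hilt
      obtain ⟨hi1, hile, hInv⟩ := hQ
      have hid : ((i.toNat - 1 : Nat) : Int) + 1 = i := by omega
      have step := pv_outer_step T a b ob hT (i.toNat - 1) m hInv (by omega)
      rw [hid] at step
      refine ⟨by omega, by omega, ?_⟩
      have : (i + 1).toNat - 1 = i.toNat - 1 + 1 := by omega
      rw [this]
      exact step)
    1 m0 (by omega) ⟨le_rfl, by omega, by simpa using h0⟩
  obtain ⟨-, -, hInv⟩ := main
  simpa using hInv
theorem pv_m0_row (T : Int) (ob : List Int) (k : Nat) (hk : k < ob.length) :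
    ((List.range ob.length).map (fun _ => List.replicate (T + 2).toNat (10 ^ 6 : Int))).getD k []
      = List.replicate (T + 2).toNat (10 ^ 6) := by
  simp [List.getD_eq_getElem?_getD, List.getElem?_map, List.getElem?_range, hk]

theorem pv_inv_init (T a b : Int) (ob : List Int) (hT : 0 ≤ T) (hn : 1 ≤ ob.length) :
    pvInv T a b ob 0
      (pvSet2 ((List.range ob.length).map (fun _ => List.replicate (T + 2).toNat (10 ^ 6))) 0 0 0) := by
  have hW : 2 ≤ (T + 2).toNat := by omega
  rw [pvSet2_nonneg _ _ _ _ le_rfl]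
  simp only [Int.toNat_zero]
  have hlen : ((List.range ob.length).map (fun _ => List.replicate (T + 2).toNat (10 ^ 6 : Int))).length = ob.length := by simp
  have hrow0 := pv_m0_row T ob 0 (by omega)
  refine ⟨by simpa using hlen, ?_, ?_, ?_⟩
  · rw [pv_getD_set_self' _ _ _ _ (by omega)]
    rw [hrow0]
    simp [PySem.List.pySetD_of_nonneg _ _ le_rfl]
  · intro k hk
    rw [pv_getD_set_self' _ _ _ _ (by omega), hrow0,
      PySem.List.pySetD_of_nonneg _ _ le_rfl]
    simp only [Int.toNat_zero]
    by_cases hk0 : k = 0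
    · subst hk0
      rw [pv_getD_set_self' _ _ _ _ (by simpa using by omega : (0:Nat) < (List.replicate (T+2).toNat (10^6:Int)).length)]
      simp [pvAltCost]
    · rw [pv_getD_set_ne' _ _ _ _ _ (by omega : 0 ≠ k)]
      simp only [pvAltCost]
      rw [if_neg (by exact_mod_cast hk0)]
      simp [List.getD_eq_getElem?_getD, List.getElem?_replicate, hk]
  · intro k hk1 hk2
    rw [pv_getD_set_ne' _ _ _ _ _ (by omega : 0 ≠ k)]
    exact pv_m0_row T ob k hk2

theorem pv_solution_T_nonneg (temperature t1 t2 a b : Int) (ob : List Int) (hob : ob ≠ [])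
    (hT : 0 ≤ max (temperature - t2) (t1 - temperature)) :
    solution temperature t1 t2 a b ob = solution_alt temperature t1 t2 a b ob := by
  have hn : 1 ≤ ob.length := List.length_pos_iff.mpr hob
  have hsol : solution temperature t1 t2 a b ob
      = (PySem.List.min? (PySem.List.pyGetD
          ((PySem.List.pyRange 1 (ob.length : Int) 1).foldl
            (pvOuterA (max (temperature - t2) (t1 - temperature)) a b ob)
            (pvSet2 ((List.range ob.length).map
              (fun _ => List.replicate ((max (temperature - t2) (t1 - temperature)) + 2).toNat (10 ^ 6))) 0 0 0))
          ((ob.length : Int) - 1) []) (fun x => x)).getD 0 := rfl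
  have halt : solution_alt temperature t1 t2 a b ob
      = (PySem.List.min? ((PySem.List.pyRange 0 ((max (temperature - t2) (t1 - temperature)) + 2) 1).map
          (fun j => pvAltCost (max (temperature - t2) (t1 - temperature)) a b ob (ob.length - 1) j))
          (fun x => x)).getD 0 := by
    rw [show solution_alt temperature t1 t2 a b ob
        = (PySem.List.min? (pvRowB (max (temperature - t2) (t1 - temperature)) a b ob (ob.length - 1))
            (fun x => x)).getD 0 from rfl,
      pvRowB_eq_map]
  rw [hsol, halt]
  obtain ⟨hlen, hrowlen, hrow, -⟩ :=
    pv_outer_all (max (temperature - t2) (t1 - temperature)) a b ob hT hn _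
      (pv_inv_init (max (temperature - t2) (t1 - temperature)) a b ob hT hn)
  congr 1
  have hidx : PySem.List.pyGetD
      ((PySem.List.pyRange 1 (ob.length : Int) 1).foldl
        (pvOuterA (max (temperature - t2) (t1 - temperature)) a b ob)
        (pvSet2 ((List.range ob.length).map
          (fun _ => List.replicate ((max (temperature - t2) (t1 - temperature)) + 2).toNat (10 ^ 6))) 0 0 0))
      ((ob.length : Int) - 1) []
      = ((PySem.List.pyRange 1 (ob.length : Int) 1).foldl
        (pvOuterA (max (temperature - t2) (t1 - temperature)) a b ob)
        (pvSet2 ((List.range ob.length).map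
          (fun _ => List.replicate ((max (temperature - t2) (t1 - temperature)) + 2).toNat (10 ^ 6))) 0 0 0)).getD (ob.length - 1) [] := by
    rw [PySem.List.pyGetD_of_nonneg _ _ (by omega)]
    congr 1
    omega
  rw [hidx]
  congr 1
  apply List.ext_getElem
  · rw [hrowlen]
    simp [PySem.List.length_pyRange_one]
  · intro k hk1 hk2
    have hkW : k < ((max (temperature - t2) (t1 - temperature)) + 2).toNat := by
      rw [hrowlen] at hk1; exact hk1
    have hget : (((PySem.List.pyRange 1 (ob.length : Int) 1).foldl
        (pvOuterA (max (temperature - t2) (t1 - temperature)) a b ob)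
        (pvSet2 ((List.range ob.length).map
          (fun _ => List.replicate ((max (temperature - t2) (t1 - temperature)) + 2).toNat (10 ^ 6))) 0 0 0)).getD (ob.length - 1) [])[k]
        = pvAltCost (max (temperature - t2) (t1 - temperature)) a b ob (ob.length - 1) (k : Int) := by
      rw [← hrow k hkW]
      exact (List.getD_eq_getElem _ 0 hk1).symm
    rw [hget]
    rw [List.getElem_map, PySem.List.getElem_pyRange_one]
    rw [zero_add]
theorem pv_alt_neg1_zero (a b : Int) (ob : List Int) : ∀ i : Nat, pvAltCost (-1) a b ob i 0 = 0
  | 0 => by simp [pvAltCost]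
  | i + 1 => by
    simp only [pvAltCost]
    rw [if_neg (by split_ifs <;> omega)]
    rw [pv_alt_neg1_zero a b ob i]
    norm_num

theorem pv_rowstep_neg1_j0 (a b c x : Int) : pvRowStep (-1) a b [c] [x] 0 = [min x c] := by
  simp [pvRowStep, PySem.List.pySetD, PySem.List.pySet?, PySem.List.pyIdx?,
    PySem.List.pyGetD, PySem.List.pyGet?]

theorem pv_rowstep_neg1_jm1 (a b c x : Int) : pvRowStep (-1) a b [c] [x] (-1) = [min (min x (c + b)) c] := by
  norm_num [pvRowStep, PySem.List.pySetD, PySem.List.pySet?, PySem.List.pyIdx?,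
    PySem.List.pyGetD, PySem.List.pyGet?]

def pvInvN (ob : List Int) (it : Nat) (m : List (List Int)) : Prop :=
  m.length = ob.length ∧ m.getD it [] = [0] ∧
  ∀ k : Nat, it < k → k < ob.length → m.getD k [] = [10 ^ 6]

theorem pv_outer_step_neg1 (a b : Int) (ob : List Int)
    (hb : 0 ≤ b ∨ ∀ x ∈ ob.drop 1, x = 0) (it : Nat) (m : List (List Int))
    (h : pvInvN ob it m) (hlt : it + 1 < ob.length) :
    pvInvN ob (it + 1) (pvOuterA (-1) a b ob m ((it : Int) + 1)) := by
  obtain ⟨hlen, hrow, hrest⟩ := h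
  have hcell : pvOuterA (-1) a b ob m ((it : Int) + 1)
      = (PySem.List.pyRange (if PySem.List.pyGetD ob ((it : Int) + 1) 0 ≠ 0 then (-1) else 0) ((-1) + 1 + 1) 1).foldl
          (fun c j => pvCellA (-1) a b c ((it : Int) + 1) j) m := rfl
  have h11 : ((-1 : Int) + 1 + 1) = 1 := by norm_num
  rw [hcell, h11]
  have hfold := pv_foldl_cellA (-1) a b
    (PySem.List.pyRange (if PySem.List.pyGetD ob ((it : Int) + 1) 0 ≠ 0 then (-1) else 0) 1 1)
    m (m.getD (it + 1) []) ((it : Int) + 1) (by omega) (by omega)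
  have hitn : ((it : Int) + 1).toNat = it + 1 := by omega
  rw [hitn, pv_set_getD_self m (it + 1) [] (by omega)] at hfold
  have hprev : it + 1 - 1 = it := by omega
  rw [hprev, hrow] at hfold
  have hinit : m.getD (it + 1) [] = [10 ^ 6] := hrest (it + 1) (by omega) hlt
  rw [hinit] at hfold
  rw [hfold]
  have hrownew : (PySem.List.pyRange (if PySem.List.pyGetD ob ((it : Int) + 1) 0 ≠ 0 then (-1) else 0) 1 1).foldl
      (pvRowStep (-1) a b [0]) [10 ^ 6] = [0] := by
    by_cases hobi : PySem.List.pyGetD ob ((it : Int) + 1) 0 ≠ 0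
    · have hb0 : 0 ≤ b := by
        rcases hb with hb0 | hall
        · exact hb0
        · exfalso
          apply hobi
          have hgd : PySem.List.pyGetD ob ((it : Int) + 1) 0 = ob[it + 1]'(by omega) := by
            rw [PySem.List.pyGetD_of_nonneg _ _ (by omega), hitn]
            exact List.getD_eq_getElem ob 0 (by omega)
          rw [hgd]
          apply hall
          have : ob[it + 1]'(by omega) = (ob.drop 1)[it]'(by simpa using by omega) := by
            rw [List.getElem_drop]
            congr 1
            omega
          rw [this]
          exact List.getElem_mem _
      rw [if_pos hobi]
      have hr2 : PySem.List.pyRange (-1) 1 1 = [-1, 0] := by decide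
      rw [hr2]
      simp only [List.foldl_cons, List.foldl_nil]
      rw [pv_rowstep_neg1_jm1 a b 0]
      have : min (min (10 ^ 6 : Int) (0 + b)) 0 = 0 := by omega
      rw [this, pv_rowstep_neg1_j0 a b 0]
      norm_num
    · rw [if_neg hobi]
      have hr1 : PySem.List.pyRange 0 1 1 = [0] := by decide
      rw [hr1]
      simp only [List.foldl_cons, List.foldl_nil]
      rw [pv_rowstep_neg1_j0 a b 0]
      norm_num
  rw [hrownew]
  refine ⟨by simpa using hlen, ?_, ?_⟩
  · rw [pv_getD_set_self' _ _ _ _ (by omega)]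
  · intro k hk1 hk2
    rw [pv_getD_set_ne' _ _ _ _ _ (by omega : it + 1 ≠ k)]
    exact hrest k (by omega) hk2

theorem pv_outer_all_neg1 (a b : Int) (ob : List Int)
    (hb : 0 ≤ b ∨ ∀ x ∈ ob.drop 1, x = 0) (hn : 1 ≤ ob.length)
    (m0 : List (List Int)) (h0 : pvInvN ob 0 m0) :
    pvInvN ob (ob.length - 1) ((PySem.List.pyRange 1 (ob.length : Int) 1).foldl (pvOuterA (-1) a b ob) m0) := by
  have main := pv_foldl_pyRange_inv (pvOuterA (-1) a b ob) (ob.length : Int)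
    (fun s m => 1 ≤ s ∧ s ≤ (ob.length : Int) ∧ pvInvN ob (s.toNat - 1) m)
    (by
      intro i m hQ hilt
      obtain ⟨hi1, hile, hInv⟩ := hQ
      have hid : ((i.toNat - 1 : Nat) : Int) + 1 = i := by omega
      have step := pv_outer_step_neg1 a b ob hb (i.toNat - 1) m hInv (by omega)
      rw [hid] at step
      refine ⟨by omega, by omega, ?_⟩
      have : (i + 1).toNat - 1 = i.toNat - 1 + 1 := by omega
      rw [this]
      exact step)
    1 m0 (by omega) ⟨le_rfl, by omega, by simpa using h0⟩
  obtain ⟨-, -, hInv⟩ := main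
  simpa using hInv

theorem pv_alt_neg1_val (temperature t1 t2 a b : Int) (ob : List Int)
    (hneg : max (temperature - t2) (t1 - temperature) = -1) :
    solution_alt temperature t1 t2 a b ob = 0 := by
  have halt : solution_alt temperature t1 t2 a b ob
      = (PySem.List.min? ((PySem.List.pyRange 0 ((max (temperature - t2) (t1 - temperature)) + 2) 1).map
          (fun j => pvAltCost (max (temperature - t2) (t1 - temperature)) a b ob (ob.length - 1) j))
          (fun x => x)).getD 0 := by
    rw [show solution_alt temperature t1 t2 a b ob
        = (PySem.List.min? (pvRowB (max (temperature - t2) (t1 - temperature)) a b ob (ob.length - 1))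
            (fun x => x)).getD 0 from rfl,
      pvRowB_eq_map]
  rw [halt, hneg]
  rw [show ((-1 : Int) + 2) = 1 from by norm_num]
  rw [show PySem.List.pyRange 0 1 1 = [0] from by decide]
  simp only [List.map_cons, List.map_nil]
  rw [pv_alt_neg1_zero a b ob]
  rfl

theorem pv_initN (ob : List Int) (hn : 1 ≤ ob.length) :
    pvInvN ob 0 (pvSet2 ((List.range ob.length).map (fun _ => List.replicate 1 (10 ^ 6))) 0 0 0) := by
  rw [pvSet2_nonneg _ _ _ _ le_rfl]
  simp only [Int.toNat_zero]
  have hrow0 : ((List.range ob.length).map (fun _ => List.replicate 1 (10 ^ 6 : Int))).getD 0 []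
      = List.replicate 1 (10 ^ 6) := by
    have hpos : 0 < ob.length := hn
    simp [List.getD_eq_getElem?_getD, List.getElem?_map, List.getElem?_range, hpos]
  refine ⟨by simp, ?_, ?_⟩
  · rw [pv_getD_set_self' _ _ _ _ (by simpa using hn), hrow0]
    simp [PySem.List.pySetD_of_nonneg _ _ le_rfl]
  · intro k hk1 hk2
    rw [pv_getD_set_ne' _ _ _ _ _ (by omega : 0 ≠ k)]
    simp [List.getD_eq_getElem?_getD, hk2]

-- A's value at target = -1 is the sole entry of the last single-column row.
theorem pv_sol_neg1_eq_head (temperature t1 t2 a b : Int) (ob : List Int) (hn : 1 ≤ ob.length)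
    (hneg : max (temperature - t2) (t1 - temperature) = -1) (c : Int)
    (hrow : (((PySem.List.pyRange 1 (ob.length : Int) 1).foldl (pvOuterA (-1) a b ob)
        (pvSet2 ((List.range ob.length).map (fun _ => List.replicate 1 (10 ^ 6))) 0 0 0))).getD (ob.length - 1) [] = [c]) :
    solution temperature t1 t2 a b ob = c := by
  have hsol : solution temperature t1 t2 a b ob
      = (PySem.List.min? (PySem.List.pyGetD
          ((PySem.List.pyRange 1 (ob.length : Int) 1).foldl
            (pvOuterA (max (temperature - t2) (t1 - temperature)) a b ob)
            (pvSet2 ((List.range ob.length).map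
              (fun _ => List.replicate ((max (temperature - t2) (t1 - temperature)) + 2).toNat (10 ^ 6))) 0 0 0))
          ((ob.length : Int) - 1) []) (fun x => x)).getD 0 := rfl
  rw [hsol, hneg]
  rw [show ((-1 : Int) + 2).toNat = 1 from by norm_num]
  have hidx : PySem.List.pyGetD
      ((PySem.List.pyRange 1 (ob.length : Int) 1).foldl (pvOuterA (-1) a b ob)
        (pvSet2 ((List.range ob.length).map (fun _ => List.replicate 1 (10 ^ 6))) 0 0 0))
      ((ob.length : Int) - 1) []
      = ((PySem.List.pyRange 1 (ob.length : Int) 1).foldl (pvOuterA (-1) a b ob)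
        (pvSet2 ((List.range ob.length).map (fun _ => List.replicate 1 (10 ^ 6))) 0 0 0)).getD (ob.length - 1) [] := by
    rw [PySem.List.pyGetD_of_nonneg _ _ (by omega)]
    congr 1
    omega
  rw [hidx, hrow]
  simp [PySem.List.min?_id_cons]

theorem pv_solution_T_neg1 (temperature t1 t2 a b : Int) (ob : List Int) (hob : ob ≠ [])
    (hneg : max (temperature - t2) (t1 - temperature) = -1)
    (hb : 0 ≤ b ∨ ∀ x ∈ ob.drop 1, x = 0) :
    solution temperature t1 t2 a b ob = solution_alt temperature t1 t2 a b ob := by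
  have hn : 1 ≤ ob.length := List.length_pos_iff.mpr hob
  obtain ⟨-, hrow, -⟩ := pv_outer_all_neg1 a b ob hb hn _ (pv_initN ob hn)
  rw [pv_alt_neg1_val temperature t1 t2 a b ob hneg]
  exact pv_sol_neg1_eq_head temperature t1 t2 a b ob hn hneg 0 hrow

-- invariant for the strict difference inside D_: the single column holds one value c ≤ 0,
-- strictly negative as soon as somebody boarded at a time ≥ 1
def pvInvT (ob : List Int) (it : Nat) (m : List (List Int)) : Prop :=
  m.length = ob.length ∧
  (∃ c : Int, m.getD it [] = [c] ∧ c ≤ 0 ∧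
    ((∃ k : Nat, 1 ≤ k ∧ k ≤ it ∧ ob.getD k 0 ≠ 0) → c < 0)) ∧
  ∀ k : Nat, it < k → k < ob.length → m.getD k [] = [10 ^ 6]

theorem pv_outer_step_tight (a b : Int) (ob : List Int) (hbneg : b < 0) (it : Nat)
    (m : List (List Int)) (h : pvInvT ob it m) (hlt : it + 1 < ob.length) :
    pvInvT ob (it + 1) (pvOuterA (-1) a b ob m ((it : Int) + 1)) := by
  obtain ⟨hlen, ⟨c, hrow, hc0, hcb⟩, hrest⟩ := h
  have hcell : pvOuterA (-1) a b ob m ((it : Int) + 1)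
      = (PySem.List.pyRange (if PySem.List.pyGetD ob ((it : Int) + 1) 0 ≠ 0 then (-1) else 0) ((-1) + 1 + 1) 1).foldl
          (fun cst j => pvCellA (-1) a b cst ((it : Int) + 1) j) m := rfl
  rw [hcell, show ((-1 : Int) + 1 + 1) = 1 from by norm_num]
  have hfold := pv_foldl_cellA (-1) a b
    (PySem.List.pyRange (if PySem.List.pyGetD ob ((it : Int) + 1) 0 ≠ 0 then (-1) else 0) 1 1)
    m (m.getD (it + 1) []) ((it : Int) + 1) (by omega) (by omega)
  have hitn : ((it : Int) + 1).toNat = it + 1 := by omega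
  rw [hitn, pv_set_getD_self m (it + 1) [] (by omega)] at hfold
  rw [show it + 1 - 1 = it from by omega, hrow] at hfold
  rw [hrest (it + 1) (by omega) hlt] at hfold
  rw [hfold]
  by_cases hobi : PySem.List.pyGetD ob ((it : Int) + 1) 0 ≠ 0
  · have hrownew : (PySem.List.pyRange (if PySem.List.pyGetD ob ((it : Int) + 1) 0 ≠ 0 then (-1) else 0) 1 1).foldl
        (pvRowStep (-1) a b [c]) [10 ^ 6]
        = [min (min (min (10 ^ 6) (c + b)) c) c] := by
      rw [if_pos hobi, show PySem.List.pyRange (-1) 1 1 = [-1, 0] from by decide]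
      simp only [List.foldl_cons, List.foldl_nil]
      rw [pv_rowstep_neg1_jm1 a b c, pv_rowstep_neg1_j0 a b c]
    rw [hrownew]
    refine ⟨by simpa using hlen, ⟨min (min (min (10 ^ 6) (c + b)) c) c,
      pv_getD_set_self' _ _ _ _ (by omega), by omega, fun _ => by omega⟩, ?_⟩
    intro k hk1 hk2
    rw [pv_getD_set_ne' _ _ _ _ _ (by omega : it + 1 ≠ k)]
    exact hrest k (by omega) hk2
  · have hrownew : (PySem.List.pyRange (if PySem.List.pyGetD ob ((it : Int) + 1) 0 ≠ 0 then (-1) else 0) 1 1).foldl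
        (pvRowStep (-1) a b [c]) [10 ^ 6] = [min (10 ^ 6) c] := by
      rw [if_neg hobi, show PySem.List.pyRange 0 1 1 = [0] from by decide]
      simp only [List.foldl_cons, List.foldl_nil]
      rw [pv_rowstep_neg1_j0 a b c]
    rw [hrownew]
    have hzero : ob.getD (it + 1) 0 = 0 := by
      have h' := not_not.mp hobi
      rw [PySem.List.pyGetD_of_nonneg _ _ (by omega), hitn] at h'
      exact h'
    refine ⟨by simpa using hlen, ⟨min (10 ^ 6) c,
      pv_getD_set_self' _ _ _ _ (by omega), by omega, ?_⟩, ?_⟩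
    · rintro ⟨k, hk1, hk2, hkne⟩
      have hck : c < 0 := by
        apply hcb
        refine ⟨k, hk1, ?_, hkne⟩
        rcases Nat.lt_or_ge k (it + 1) with hlt' | hge
        · omega
        · exfalso
          have : k = it + 1 := by omega
          rw [this] at hkne
          exact hkne hzero
      omega
    · intro k hk1 hk2
      rw [pv_getD_set_ne' _ _ _ _ _ (by omega : it + 1 ≠ k)]
      exact hrest k (by omega) hk2

theorem pv_outer_all_tight (a b : Int) (ob : List Int) (hbneg : b < 0) (hn : 1 ≤ ob.length)
    (m0 : List (List Int)) (h0 : pvInvT ob 0 m0) :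
    pvInvT ob (ob.length - 1) ((PySem.List.pyRange 1 (ob.length : Int) 1).foldl (pvOuterA (-1) a b ob) m0) := by
  have main := pv_foldl_pyRange_inv (pvOuterA (-1) a b ob) (ob.length : Int)
    (fun s m => 1 ≤ s ∧ s ≤ (ob.length : Int) ∧ pvInvT ob (s.toNat - 1) m)
    (by
      intro i m hQ hilt
      obtain ⟨hi1, hile, hInv⟩ := hQ
      have hid : ((i.toNat - 1 : Nat) : Int) + 1 = i := by omega
      have step := pv_outer_step_tight a b ob hbneg (i.toNat - 1) m hInv (by omega)
      rw [hid] at step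
      refine ⟨by omega, by omega, ?_⟩
      rw [show (i + 1).toNat - 1 = i.toNat - 1 + 1 from by omega]
      exact step)
    1 m0 (by omega) ⟨le_rfl, by omega, by simpa using h0⟩
  obtain ⟨-, -, hInv⟩ := main
  simpa using hInv

-- ===== VERDICT (by name: the statement is the Claim_ definition above) =====
theorem solution_spec : Claim_unchanged_solution := by
  unfold Claim_unchanged_solution
  intro temperature t1 t2 a b onboard hDom hPre hnD
  obtain ⟨hob, hT⟩ := hPre
  by_cases hT0 : 0 ≤ max (temperature - t2) (t1 - temperature)
  · exact pv_solution_T_nonneg temperature t1 t2 a b onboard hob hT0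
  · have hneg : max (temperature - t2) (t1 - temperature) = -1 := by omega
    apply pv_solution_T_neg1 temperature t1 t2 a b onboard hob hneg
    unfold D_solution at hnD
    by_cases hb0 : 0 ≤ b
    · exact Or.inl hb0
    · refine Or.inr ?_
      intro x hx
      by_contra hxne
      exact hnD ⟨hneg, by omega, ⟨x, hx, hxne⟩⟩

theorem solution_changed : Claim_changed_solution := by
  unfold Claim_changed_solution; decide

theorem solution_tight : Claim_exact_solution := by
  unfold Claim_exact_solution
  intro temperature t1 t2 a b onboard hDom hPre hD
  obtain ⟨hob, -⟩ := hPre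
  obtain ⟨hneg, hbneg, x, hx, hxne⟩ := hD
  have hn : 1 ≤ onboard.length := List.length_pos_iff.mpr hob
  have h0 : pvInvT onboard 0
      (pvSet2 ((List.range onboard.length).map (fun _ => List.replicate 1 (10 ^ 6))) 0 0 0) := by
    obtain ⟨hlen0, hrow0, hrest0⟩ := pv_initN onboard hn
    exact ⟨hlen0, ⟨0, hrow0, le_rfl, by rintro ⟨k, hk1, hk2, -⟩; omega⟩, hrest0⟩
  obtain ⟨-, ⟨c, hrow, hc0, hcb⟩, -⟩ := pv_outer_all_tight a b onboard hbneg hn _ h0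
  have hboard : ∃ k : Nat, 1 ≤ k ∧ k ≤ onboard.length - 1 ∧ onboard.getD k 0 ≠ 0 := by
    obtain ⟨idx, hidxlt, hxe⟩ := List.getElem_of_mem hx
    have hidx' : idx < onboard.length - 1 := by simpa using hidxlt
    refine ⟨1 + idx, by omega, by omega, ?_⟩
    rw [List.getElem_drop] at hxe
    rw [List.getD_eq_getElem _ _ (by omega), hxe]
    exact hxne
  have hA : solution temperature t1 t2 a b onboard = c :=
    pv_sol_neg1_eq_head temperature t1 t2 a b onboard hn hneg c hrow
  rw [hA, pv_alt_neg1_val temperature t1 t2 a b onboard hneg]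
  exact fun hEq => absurd hEq (by have := hcb hboard; omega)
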